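-- pv_equiv track=rewrite | github.com/Lucas-Armand/ERMES-CC | mainBot_0.4/mainbot.py | tokenConcatenation
-- ===== SOURCE A (Python) =====
-- def tokenConcatenation(tokens):
--
--     #
--     concatenationList = ['bom', 'boa','dia','tudo','como']
--     #
--     tok_buffer = ''
--     new_tokens = []
--     for tok in tokens:
--         if tok_buffer != '':
--             new_tok = tok_buffer+' '+tok
--             new_tokens.append(new_tok)
--             tok_buffer = ''
--         else:
--             if tok in concatenationList:
--                 tok_buffer = tok
--             else:
--                 new_tokens.append(tok)
--     return new_tokens
-- ===== SOURCE B (Python) =====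
-- def tokenConcatenation(tokens):
--     greetings = ('bom', 'boa', 'dia', 'tudo', 'como')
--     toks = list(tokens)
--     n = len(toks)
--     new_tokens = []
--     i = 0
--     while i < n:
--         t = toks[i]
--         if t in greetings:
--             if i + 1 < n:
--                 new_tokens.append(t + ' ' + toks[i + 1])
--                 i += 2
--             else:
--                 i += 1  # trailing greeting is dropped
--         else:
--             new_tokens.append(t)
--             i += 1
--     return new_tokens
-- ===== Notes on version B (the rewrite author's own statement) =====
-- stated objective: alternative
-- what changed: Replaces A's buffer-carrying state machine (one token of state across iterations) with an index-based lookahead loop that consumes greeting+next pairs in one step.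
import Mathlib
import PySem

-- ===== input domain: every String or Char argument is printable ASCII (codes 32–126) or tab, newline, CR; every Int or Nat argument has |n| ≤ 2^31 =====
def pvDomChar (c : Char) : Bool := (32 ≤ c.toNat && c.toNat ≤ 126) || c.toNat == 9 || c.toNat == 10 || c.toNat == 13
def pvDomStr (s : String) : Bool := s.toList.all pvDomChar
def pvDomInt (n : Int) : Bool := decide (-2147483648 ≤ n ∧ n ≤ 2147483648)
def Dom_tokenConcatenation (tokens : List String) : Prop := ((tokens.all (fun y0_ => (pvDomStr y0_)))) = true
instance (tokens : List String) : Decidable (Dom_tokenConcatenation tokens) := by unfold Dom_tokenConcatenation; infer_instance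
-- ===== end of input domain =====

-- B replaces A's buffer-carrying state machine with an index-based lookahead loop
-- consuming greeting+next pairs in one step (objective: alternative decomposition).

-- ===== PORT A =====
def pvGreet : List String := ["bom", "boa", "dia", "tudo", "como"]

-- A's loop body: state is (tok_buffer, new_tokens)
def pvStepA (st : String × List String) (tok : String) : String × List String :=
  if st.1 ≠ "" then
    ("", st.2 ++ [st.1 ++ " " ++ tok])
  else
    if tok ∈ pvGreet then (tok, st.2) else (st.1, st.2 ++ [tok])

def tokenConcatenation (tokens : List String) : List String :=
  (tokens.foldl pvStepA ("", [])).2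

-- ===== PORT B =====
-- B's while loop over index i (termination: n - i decreases)
def pvLoopB (toks : List String) (i : Nat) : List String :=
  if h : i < toks.length then
    let t := toks[i]
    if t ∈ pvGreet then
      if h2 : i + 1 < toks.length then
        (t ++ " " ++ toks[i + 1]) :: pvLoopB toks (i + 2)
      else
        pvLoopB toks (i + 1)
    else
      t :: pvLoopB toks (i + 1)
  else []
termination_by toks.length - i

def tokenConcatenation_alt (tokens : List String) : List String :=
  pvLoopB tokens 0

-- ===== PRECONDITION & SPEC =====
def Spec_tokenConcatenation (tokens : List String) (out : List String) : Prop := out = tokenConcatenation_alt tokens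
instance (tokens : List String) (out : List String) : Decidable (Spec_tokenConcatenation tokens out) := by unfold Spec_tokenConcatenation; infer_instance

-- ===== CLAIM (what is proved, stated in full; the proofs are below) =====
def Claim_equal_tokenConcatenation : Prop := ∀ (tokens : List String), Dom_tokenConcatenation tokens → Spec_tokenConcatenation tokens (tokenConcatenation tokens)

-- ===== LEMMAS AND PROOFS =====

-- structural reference version, used only to relate the two loops
def pvSpecL : List String → List String
  | [] => []
  | t :: rest =>
    if t ∈ pvGreet then
      match rest with
      | [] => []
      | u :: r => (t ++ " " ++ u) :: pvSpecL r
    else t :: pvSpecL rest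

theorem pvSpecL_nil : pvSpecL [] = [] := rfl

theorem pvSpecL_single_greet (t : String) (hg : t ∈ pvGreet) : pvSpecL [t] = [] := by
  simp [pvSpecL, hg]

theorem pvSpecL_pair_greet (t u : String) (r : List String) (hg : t ∈ pvGreet) :
    pvSpecL (t :: u :: r) = (t ++ " " ++ u) :: pvSpecL r := by
  simp [pvSpecL, hg]

theorem pvSpecL_cons_non (t : String) (rest : List String) (hg : t ∉ pvGreet) :
    pvSpecL (t :: rest) = t :: pvSpecL rest := by
  cases rest <;> simp [pvSpecL, hg]

theorem pvGreet_ne_empty {t : String} (h : t ∈ pvGreet) : t ≠ "" := by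
  simp [pvGreet] at h
  rcases h with h | h | h | h | h <;> subst h <;> decide

-- A's fold from the empty-buffer state equals acc ++ pvSpecL l
theorem pvFoldA_eq (n : Nat) : ∀ (l : List String), l.length ≤ n →
    ∀ acc : List String, (l.foldl pvStepA ("", acc)).2 = acc ++ pvSpecL l := by
  induction n with
  | zero =>
    intro l hl acc
    have : l = [] := List.eq_nil_of_length_eq_zero (Nat.le_zero.mp hl)
    subst this; simp [pvSpecL]
  | succ n ih =>
    intro l hl acc
    match l with
    | [] => simp [pvSpecL]
    | t :: rest =>
      by_cases hg : t ∈ pvGreet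
      · have hne := pvGreet_ne_empty hg
        match rest with
        | [] =>
          simp [pvStepA, hg, pvSpecL_single_greet t hg]
        | u :: r =>
          have hr : r.length ≤ n := by simp at hl; omega
          simp only [List.foldl_cons]
          rw [show pvStepA ("", acc) t = (t, acc) by simp [pvStepA, hg],
              show pvStepA (t, acc) u = ("", acc ++ [t ++ " " ++ u]) by simp [pvStepA, hne],
              ih r hr (acc ++ [t ++ " " ++ u]),
              pvSpecL_pair_greet t u r hg]
          simp
      · have hrest : rest.length ≤ n := by simp at hl; omega
        simp only [List.foldl_cons]
        rw [show pvStepA ("", acc) t = ("", acc ++ [t]) by simp [pvStepA, hg],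
            ih rest hrest (acc ++ [t]), pvSpecL_cons_non t rest hg]
        simp

-- B's index loop equals pvSpecL of the remaining suffix
theorem pvLoopB_eq (toks : List String) : ∀ (k i : Nat), toks.length - i ≤ k →
    pvLoopB toks i = pvSpecL (toks.drop i) := by
  intro k
  induction k with
  | zero =>
    intro i hi
    have h : ¬ i < toks.length := by omega
    rw [pvLoopB, dif_neg h, List.drop_eq_nil_of_le (by omega)]
    rfl
  | succ k ih =>
    intro i hi
    by_cases h : i < toks.length
    · have hd : toks.drop i = toks[i] :: toks.drop (i + 1) := by
        rw [List.drop_eq_getElem_cons h]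
      rw [pvLoopB, dif_pos h, hd]
      by_cases hg : toks[i] ∈ pvGreet
      · rw [if_pos hg]
        by_cases h2 : i + 1 < toks.length
        · have hd2 : toks.drop (i + 1) = toks[i+1] :: toks.drop (i + 2) := by
            rw [List.drop_eq_getElem_cons h2]
          rw [dif_pos h2, hd2, pvSpecL_pair_greet _ _ _ hg, ih (i + 2) (by omega)]
        · have hnil : toks.drop (i + 1) = [] := List.drop_eq_nil_of_le (by omega)
          rw [dif_neg h2, hnil, pvSpecL_single_greet _ hg, ih (i + 1) (by omega),
              hnil, pvSpecL_nil]
      · rw [if_neg hg, pvSpecL_cons_non _ _ hg, ih (i + 1) (by omega)]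
    · rw [pvLoopB, dif_neg h, List.drop_eq_nil_of_le (by omega)]
      rfl

-- ===== VERDICT (by name: the statement is the Claim_ definition above) =====
theorem tokenConcatenation_spec : Claim_equal_tokenConcatenation := by
  intro tokens _
  unfold Spec_tokenConcatenation tokenConcatenation tokenConcatenation_alt
  rw [pvFoldA_eq tokens.length tokens le_rfl [],
      pvLoopB_eq tokens tokens.length 0 (by omega)]
  simp
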